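/- GENERATED by farm/mkstatement.py from design/units.tsv (unit `start_decoder.R16e`) and the assertions of Vorbis/Spec/StartDecoderR16.lean — do not edit.
   THE STATEMENT of the proof unit `start_decoder.R16e`: segment R16e of `start_decoder` (2 instructions; entries 0x11677b;
   exits 0x115f97; ranges 0x11677b-0x11677f)
   takes each of its entry assertions to one of its exit assertions (`Vorbis.Spec.StartDecoder.SegR16e`), given the contracts of its callees.
   What the names mean: Vorbis/Spec/Basic.lean (the shared hypotheses), Vorbis/Spec/StartDecoderR16.lean (the assertions). The theorem to prove:
   `theorem start_decoder_R16e_ok : Vorbis.Spec.start_decoder_R16e.Statement`. -/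
import Vorbis.Spec.StartDecoderR16
namespace Vorbis.Spec.start_decoder_R16e
open X86 X86.User Asan

/-- The statement of unit `start_decoder.R16e`. -/
def Statement : Prop :=
  ∀ (Lay : Layout) (_hLay : Lay.hi = 0x1000000) (μ : Microarch) (_hμ : UserX.MicroOK μ) (u₀ : State)
    (_hcode : HasCodeNat Lay u₀ Vorbis.L.start_decoder.entry Vorbis.Code.code_start_decoder.nat Vorbis.L.start_decoder.size),
    Vorbis.Spec.StartDecoder.SegR16e Lay μ u₀

end Vorbis.Spec.start_decoder_R16e
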